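-- pv_equiv track=rewrite | github.com/martinhjel/NordicNuclearAnalysis | Archive/ARCHIVED_functions.py | get_time_steps_for_years
-- ===== SOURCE A (Python) =====
-- def get_time_steps_for_years(selected_years):
--     """
--     Given a list of specific years, return a dictionary with min and max time step indices for each year.
--
--     Parameters:
--     selected_years (list of int): The years to include (between 1991 and 2020).
--
--     list_of_years = get_time_steps_for_years(selected_years=[1993, 2001, 2009, 2018])
--
--     Returns:
--     dict: {year: [min_time_step, max_time_step]} for each selected year.
--     """
--     first_year = 1991
--     last_year = 2020
--     leap_years = {1992, 1996, 2000, 2004, 2008, 2012, 2016, 2020}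
--
--     # Validate input years
--     if any(year < first_year or year > last_year for year in selected_years):
--         raise ValueError(f"Years must be between {first_year} and {last_year}")
--
--     # Sort the years to process them in order
--     selected_years = sorted(selected_years)
--
--     # Initialize tracking of time steps
--     min_time_step = 0
--     year_time_steps = {}
--
--     # Loop through all years to calculate min/max for each selected year
--     for year in range(first_year, last_year + 1):
--         year_hours = 8784 if year in leap_years else 8760  # Handle leap years
--
--         if year in selected_years:
--             max_time_step = min_time_step + year_hours - 1
--             year_time_steps[year] = [min_time_step, max_time_step]
--
--         # Move to next year
--         min_time_step += year_hours
--
--     return year_time_steps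
-- ===== SOURCE B (Python) =====
-- def get_time_steps_for_years(selected_years):
--     first_year = 1991
--     last_year = 2020
--     leap_years = {1992, 1996, 2000, 2004, 2008, 2012, 2016, 2020}
--
--     if any(year < first_year or year > last_year for year in selected_years):
--         raise ValueError(f"Years must be between {first_year} and {last_year}")
--
--     year_time_steps = {}
--     for year in sorted(set(selected_years)):
--         start = (year - first_year) * 8760 + 24 * sum(1 for l in leap_years if l < year)
--         hours = 8784 if year in leap_years else 8760
--         year_time_steps[year] = [start, start + hours - 1]
--     return year_time_steps
-- ===== Notes on version B (the rewrite author's own statement) =====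
-- stated objective: simpler
-- what changed: Replaces the 30-year accumulating sweep over range(1991,2021) with a direct closed-form start index per selected year ((Y-1991)*8760 + 24*leaps-before-Y), iterating only the sorted distinct selected years.
import Mathlib
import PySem

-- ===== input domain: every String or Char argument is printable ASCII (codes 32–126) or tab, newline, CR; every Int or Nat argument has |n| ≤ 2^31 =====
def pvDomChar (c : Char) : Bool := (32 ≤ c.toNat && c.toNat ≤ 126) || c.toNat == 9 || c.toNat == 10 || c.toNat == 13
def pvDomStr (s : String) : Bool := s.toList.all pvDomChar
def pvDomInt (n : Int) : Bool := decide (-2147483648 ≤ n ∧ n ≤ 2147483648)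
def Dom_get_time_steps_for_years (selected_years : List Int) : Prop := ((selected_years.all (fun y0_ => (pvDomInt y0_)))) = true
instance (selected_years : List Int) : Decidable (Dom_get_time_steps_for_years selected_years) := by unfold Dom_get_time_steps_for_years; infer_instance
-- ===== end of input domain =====

-- B replaces A's accumulating sweep over all 30 years by a closed-form start index per selected year (objective: simpler).
-- Python A raises ValueError on out-of-range years; those inputs are excluded by Pre_.

-- ===== PORT A =====
def pvLeapYears : PySem.Set Int :=
  PySem.Set.ofList [1992, 1996, 2000, 2004, 2008, 2012, 2016, 2020]

def get_time_steps_for_years (selected_years : List Int) : List (Int × List Int) :=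
  let sorted_sel := PySem.List.sorted selected_years (fun x => x) false
  (((PySem.List.pyRange 1991 2021 1).foldl
      (fun (st : Int × PySem.Dict Int (List Int)) year =>
        let year_hours : Int := if year ∈ pvLeapYears then 8784 else 8760
        let d := if year ∈ sorted_sel then
                   st.2.insert year [st.1, st.1 + year_hours - 1]
                 else st.2
        (st.1 + year_hours, d))
      (0, PySem.Dict.empty)).2).items

-- ===== PORT B =====
def get_time_steps_for_years_alt (selected_years : List Int) : List (Int × List Int) :=
  ((PySem.List.sorted (PySem.Set.ofList selected_years) (fun x => x) false).foldl
      (fun (d : PySem.Dict Int (List Int)) year =>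
        let start : Int := (year - 1991) * 8760
          + 24 * (pvLeapYears.countP (fun l => decide (l < year)) : Int)
        let hours : Int := if year ∈ pvLeapYears then 8784 else 8760
        d.insert year [start, start + hours - 1])
      PySem.Dict.empty).items

-- ===== PRECONDITION & SPEC =====
-- Pre_ excludes exactly the inputs with a year below 1991 or above 2020, on which Python A raises ValueError.
def Pre_get_time_steps_for_years (selected_years : List Int) : Prop :=
  ∀ y ∈ selected_years, 1991 ≤ y ∧ y ≤ 2020

instance (selected_years : List Int) : Decidable (Pre_get_time_steps_for_years selected_years) := by
  unfold Pre_get_time_steps_for_years; infer_instance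

def pvWitness_get_time_steps_for_years : List Int := [1993, 2001, 2009, 2018]

def Spec_get_time_steps_for_years (selected_years : List Int) (out : List (Int × List Int)) : Prop :=
  out = get_time_steps_for_years_alt selected_years

instance (selected_years : List Int) (out : List (Int × List Int)) : Decidable (Spec_get_time_steps_for_years selected_years out) := by
  unfold Spec_get_time_steps_for_years; infer_instance

-- ===== CLAIM (what is proved, stated in full; the proofs are below) =====
def Claim_equal_get_time_steps_for_years : Prop :=
  ∀ (selected_years : List Int), Dom_get_time_steps_for_years selected_years →
    Pre_get_time_steps_for_years selected_years →
    Spec_get_time_steps_for_years selected_years (get_time_steps_for_years selected_years)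

-- ===== LEMMAS AND PROOFS =====

-- the closed-form start index of year y
def pvCum (y : Int) : Int :=
  (y - 1991) * 8760 + 24 * (pvLeapYears.countP (fun l => decide (l < y)) : Int)

theorem pvCum_succ (y : Int) (h1 : 1991 ≤ y) (h2 : y < 2021) :
    pvCum (y + 1) = pvCum y + (if y ∈ pvLeapYears then 8784 else 8760) := by
  interval_cases y <;> decide

theorem pvCum_1991 : pvCum 1991 = 0 := by decide

-- B's step function (shared shape of both loops after rewriting A's accumulator to pvCum)
def pvStepB (d : PySem.Dict Int (List Int)) (year : Int) : PySem.Dict Int (List Int) :=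
  d.insert year [pvCum year, pvCum year + (if year ∈ pvLeapYears then 8784 else 8760) - 1]

theorem pvAlt_eq (sel : List Int) :
    get_time_steps_for_years_alt sel
      = ((PySem.List.sorted (PySem.Set.ofList sel) (fun x => x) false).foldl pvStepB PySem.Dict.empty).items := by
  rfl

-- A's sweep from year a with accumulator pvCum a equals B's step folded over the selected years in [a, 2021)
theorem pvLoopA (sorted_sel : List Int) :
    ∀ (n : Nat) (a : Int) (d : PySem.Dict Int (List Int)), 1991 ≤ a → a + n = 2021 →
    ((PySem.List.pyRange a 2021 1).foldl
        (fun (st : Int × PySem.Dict Int (List Int)) year =>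
          let year_hours : Int := if year ∈ pvLeapYears then 8784 else 8760
          let d := if year ∈ sorted_sel then
                     st.2.insert year [st.1, st.1 + year_hours - 1]
                   else st.2
          (st.1 + year_hours, d))
        (pvCum a, d)).2
      = ((PySem.List.pyRange a 2021 1).filter (fun y => decide (y ∈ sorted_sel))).foldl pvStepB d := by
  intro n
  induction n with
  | zero =>
      intro a d _ ha
      have : (2021 : Int) ≤ a := by omega
      rw [PySem.List.pyRange_one_eq_nil this]
      rfl
  | succ m ih =>
      intro a d h1 ha
      have hlt : a < 2021 := by omega
      rw [PySem.List.pyRange_one_cons hlt]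
      simp only [List.foldl_cons, List.filter_cons]
      rw [show pvCum a + (if a ∈ pvLeapYears then 8784 else 8760) = pvCum (a + 1) from
        (pvCum_succ a h1 hlt).symm]
      by_cases hmem : a ∈ sorted_sel
      · simp only [hmem, if_pos, decide_true]
        rw [ih (a + 1) _ (by omega) (by omega)]
        simp [pvStepB, pvCum_succ a h1 hlt]
      · simp only [hmem, decide_false, if_false]
        exact ih (a + 1) d (by omega) (by omega)

-- under Pre_, sorted(set(sel)) is exactly the years of [1991, 2021) selected by sel, in order
theorem pvSorted_eq_filter (sel : List Int) (hpre : Pre_get_time_steps_for_years sel) :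
    PySem.List.sorted (PySem.Set.ofList sel) (fun x => x) false
      = (PySem.List.pyRange 1991 2021 1).filter
          (fun y => decide (y ∈ PySem.List.sorted sel (fun x => x) false)) := by
  apply PySem.List.sorted_eq_of_perm_of_pairwise_lt
  · rw [List.perm_ext_iff_of_nodup
      (List.Nodup.filter _ (PySem.List.nodup_pyRange_one 1991 2021))
      (PySem.Set.nodup_ofList sel)]
    intro y
    simp only [List.mem_filter, PySem.List.mem_pyRange_one, PySem.Set.mem_ofList,
      PySem.List.mem_sorted, decide_eq_true_eq]
    constructor
    · rintro ⟨_, hy⟩; exact hy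
    · intro hy
      have := hpre y hy
      exact ⟨⟨this.1, by omega⟩, hy⟩
  · exact List.Pairwise.filter _ (PySem.List.pairwise_lt_pyRange_one 1991 2021)

-- ===== VERDICT (by name: the statement is the Claim_ definition above) =====
theorem get_time_steps_for_years_spec : Claim_equal_get_time_steps_for_years := by
  intro sel _ hpre
  unfold Spec_get_time_steps_for_years
  rw [pvAlt_eq, pvSorted_eq_filter sel hpre]
  have h := pvLoopA (PySem.List.sorted sel (fun x => x) false) 30 1991 PySem.Dict.empty (by omega) (by omega)
  rw [pvCum_1991] at h
  exact congrArg PySem.Dict.items h
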